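-- pv_equiv track=rewrite | github.com/RinatGibadullin/security | 42/42RSAAttack.py | cube_sqrt
-- ===== SOURCE A (Python) =====
-- def cube_sqrt(n):
--     left = 0
--     right = n
--
--     while left < right:
--         mid = (left + right) // 2
--         if mid ** 3 < n:
--             left = mid + 1
--         else:
--             right = mid
--
--     return left
-- ===== SOURCE B (Python) =====
-- def cube_sqrt(n):
--     if n <= 0:
--         return 0
--     x = n
--     y = (2 * x + n // (x * x)) // 3
--     while 0 < y < x:
--         x = y
--         y = (2 * x + n // (x * x)) // 3
--     return x if x * x * x == n else x + 1
-- ===== Notes on version B (the rewrite author's own statement) =====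
-- stated objective: alternative
-- what changed: Replaces A's binary search over the whole range by an integer Newton iteration converging to the floor cube root, followed by a ceiling adjustment when n is not a perfect cube.
import Mathlib
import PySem

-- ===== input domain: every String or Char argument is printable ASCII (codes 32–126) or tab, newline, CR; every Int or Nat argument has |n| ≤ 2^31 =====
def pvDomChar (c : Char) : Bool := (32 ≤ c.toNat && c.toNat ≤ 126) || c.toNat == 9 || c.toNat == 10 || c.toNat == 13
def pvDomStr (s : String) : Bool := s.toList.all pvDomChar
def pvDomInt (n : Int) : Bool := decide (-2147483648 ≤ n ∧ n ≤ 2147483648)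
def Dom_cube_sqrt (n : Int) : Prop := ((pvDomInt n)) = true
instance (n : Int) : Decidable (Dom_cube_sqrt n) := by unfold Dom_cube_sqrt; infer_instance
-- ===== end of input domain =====

-- B replaces A's binary search by an integer Newton iteration for the floor cube root plus a
-- final ceiling adjustment (objective: alternative algorithm; measured speed advisory only).

-- ===== PORT A =====
-- while left < right: mid = (left+right)//2; if mid**3 < n: left = mid+1 else right = mid
def bsLoop (n left right : Int) : Int :=
  if h : left < right then
    let mid := PySem.Int.floordiv (left + right) 2
    if mid ^ 3 < n then bsLoop n (mid + 1) right else bsLoop n left mid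
  else left
termination_by (right - left).toNat
decreasing_by
  · have hb := PySem.Int.floordiv_two_mid_bounds (le_of_lt h)
    omega
  · have hb := PySem.Int.floordiv_two_mid_bounds (le_of_lt h)
    have hlt : PySem.Int.floordiv (left + right) 2 < right := by
      rw [PySem.Int.floordiv_lt_iff_lt_mul (by omega : (0:Int) < 2)]
      omega
    omega

def cube_sqrt (n : Int) : Int := bsLoop n 0 n

-- ===== PORT B =====
-- y = (2*x + n//(x*x))//3; while 0 < y < x: x = y; y = (2*x + n//(x*x))//3
def newtLoop (n x : Int) : Int :=
  let y := PySem.Int.floordiv (2 * x + PySem.Int.floordiv n (x * x)) 3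
  if h : 0 < y ∧ y < x then newtLoop n y else x
termination_by x.toNat
decreasing_by omega

def cube_sqrt_alt (n : Int) : Int :=
  if n ≤ 0 then 0
  else
    let x := newtLoop n n
    if x * x * x = n then x else x + 1

-- ===== PRECONDITION & SPEC =====
def Spec_cube_sqrt (n : Int) (out : Int) : Prop := out = cube_sqrt_alt n
instance (n : Int) (out : Int) : Decidable (Spec_cube_sqrt n out) := by unfold Spec_cube_sqrt; infer_instance

-- ===== CLAIM (what is proved, stated in full; the proofs are below) =====
def Claim_equal_cube_sqrt : Prop := ∀ (n : Int), Dom_cube_sqrt n → Spec_cube_sqrt n (cube_sqrt n)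

-- ===== LEMMAS AND PROOFS =====

-- L is the least nonnegative integer whose cube is ≥ n (the value A computes for n ≥ 1)
def IsCeilRoot (n L : Int) : Prop := 0 ≤ L ∧ n ≤ L ^ 3 ∧ ∀ y : Int, y < L → y ^ 3 < n

theorem cube_lt_cube {a b : Int} (h : a < b) : a ^ 3 < b ^ 3 := by
  nlinarith [sq_nonneg (a + b), sq_nonneg (a - b), sq_nonneg a, sq_nonneg b]

theorem bsLoop_correct (n : Int) : ∀ k left right, (right - left).toNat = k →
    0 ≤ left → left ≤ right → n ≤ right ^ 3 → (∀ y : Int, y < left → y ^ 3 < n) →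
    IsCeilRoot n (bsLoop n left right) := by
  intro k
  induction k using Nat.strong_induction_on with
  | _ k ih =>
    intro left right hk h0 hlr hrn hless
    rw [bsLoop]
    by_cases h : left < right
    · have hb := PySem.Int.floordiv_two_mid_bounds (le_of_lt h)
      have hmltr : PySem.Int.floordiv (left + right) 2 < right := by
        rw [PySem.Int.floordiv_lt_iff_lt_mul (by omega : (0:Int) < 2)]; omega
      simp only [h, dif_pos]
      set mid := PySem.Int.floordiv (left + right) 2 with hmid
      by_cases hc : mid ^ 3 < n
      · simp only [hc, if_pos]
        refine ih ((right - (mid + 1)).toNat) (by omega) _ _ rfl (by omega) (by omega) hrn ?_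
        intro y hy
        by_cases hyl : y < left
        · exact hless y hyl
        · rcases lt_or_eq_of_le (by omega : y ≤ mid) with h' | h'
          · calc y ^ 3 < mid ^ 3 := cube_lt_cube h'
              _ < n := hc
          · rw [h']; exact hc
      · simp only [hc]
        exact ih ((mid - left).toNat) (by omega) _ _ rfl h0 (by omega) (by omega) hless
    · simp only [h, dif_neg, not_false_iff]
      have : left = right := le_antisymm hlr (not_lt.mp h)
      exact ⟨h0, this ▸ hrn, hless⟩

theorem self_le_cube {n : Int} (hn : 1 ≤ n) : n ≤ n ^ 3 := by
  have h1 : (0:Int) ≤ n * (n - 1) * (n + 1) :=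
    mul_nonneg (mul_nonneg (by omega) (by omega)) (by omega)
  nlinarith [h1]

theorem cube_sqrt_isCeilRoot {n : Int} (hn : 1 ≤ n) : IsCeilRoot n (cube_sqrt n) := by
  refine bsLoop_correct n _ 0 n rfl le_rfl (by omega) (self_le_cube hn) ?_
  intro y hy
  have := Odd.pow_neg (by norm_num : Odd 3) hy
  linarith

-- one Newton step from x, as in port B
def nstep (n x : Int) : Int := PySem.Int.floordiv (2 * x + PySem.Int.floordiv n (x * x)) 3

theorem nstep_ge_root {n x r : Int} (hx : 1 ≤ x) (hr : 0 ≤ r) (hrn : r ^ 3 ≤ n) :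
    r ≤ nstep n x := by
  have hx2 : (0:Int) < x * x := by positivity
  rw [nstep, PySem.Int.le_floordiv_iff_mul_le (by omega : (0:Int) < 3)]
  have h1 : r * 3 - 2 * x ≤ PySem.Int.floordiv n (x * x) := by
    rw [PySem.Int.le_floordiv_iff_mul_le hx2]
    nlinarith [mul_nonneg (sq_nonneg (x - r)) (by linarith : (0:Int) ≤ 2 * x + r)]
  linarith

theorem nstep_ge_self {n x : Int} (hx : 1 ≤ x) (hxn : x ^ 3 ≤ n) : x ≤ nstep n x := by
  have hx2 : (0:Int) < x * x := by positivity
  rw [nstep, PySem.Int.le_floordiv_iff_mul_le (by omega : (0:Int) < 3)]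
  have h1 : x ≤ PySem.Int.floordiv n (x * x) := by
    rw [PySem.Int.le_floordiv_iff_mul_le hx2]
    nlinarith
  linarith

theorem nstep_lt_self {n x : Int} (hx : 1 ≤ x) (hxn : n < x ^ 3) : nstep n x < x := by
  have hx2 : (0:Int) < x * x := by positivity
  rw [nstep, PySem.Int.floordiv_lt_iff_lt_mul (by omega : (0:Int) < 3)]
  have h1 : PySem.Int.floordiv n (x * x) < x := by
    rw [PySem.Int.floordiv_lt_iff_lt_mul hx2]
    nlinarith
  linarith

theorem newtLoop_unfold (n x : Int) :
    newtLoop n x = if 0 < nstep n x ∧ nstep n x < x then newtLoop n (nstep n x) else x := by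
  rw [newtLoop, nstep]; simp [dite_eq_ite]

theorem newtLoop_eq {n r : Int} (hr : 1 ≤ r) (hrn : r ^ 3 ≤ n) (hn : n < (r + 1) ^ 3) :
    ∀ k x, x.toNat = k → r ≤ x → newtLoop n x = r := by
  intro k
  induction k using Nat.strong_induction_on with
  | _ k ih =>
    intro x hk hrx
    have hx1 : 1 ≤ x := le_trans hr hrx
    rw [newtLoop_unfold]
    rcases lt_or_eq_of_le hrx with h | h
    · have hx3 : n < x ^ 3 := lt_of_lt_of_le hn (by
        rcases lt_or_eq_of_le (by omega : r + 1 ≤ x) with h' | h'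
        · exact le_of_lt (cube_lt_cube h')
        · rw [h'])
      have hlt : nstep n x < x := nstep_lt_self hx1 hx3
      have hge : r ≤ nstep n x := nstep_ge_root hx1 (by omega) hrn
      rw [if_pos ⟨by omega, hlt⟩]
      exact ih (nstep n x).toNat (by omega) _ rfl hge
    · have hge : x ≤ nstep n x := nstep_ge_self hx1 (h ▸ hrn)
      rw [if_neg (by omega)]
      omega

-- ===== VERDICT (by name: the statement is the Claim_ definition above) =====
theorem cube_sqrt_spec : Claim_equal_cube_sqrt := by
  unfold Claim_equal_cube_sqrt Spec_cube_sqrt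
  intro n _
  by_cases hn : n ≤ 0
  · rw [cube_sqrt_alt, if_pos hn, cube_sqrt, bsLoop, dif_neg (by omega)]
  · push Not at hn
    have hn1 : 1 ≤ n := hn
    obtain ⟨hL0, hLn, hLless⟩ := cube_sqrt_isCeilRoot hn1
    set L := cube_sqrt n with hLdef
    have hL1 : 1 ≤ L := by
      by_contra h
      have : L = 0 := by omega
      rw [this] at hLn; norm_num at hLn; omega
    have hself : n ≤ n ^ 3 := self_le_cube hn1
    have hLle : L ≤ n := by
      by_contra h
      push Not at h
      have := hLless n h
      omega
    rw [cube_sqrt_alt, if_neg (by omega)]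
    by_cases hcube : L ^ 3 = n
    · have hnewt : newtLoop n n = L :=
        newtLoop_eq hL1 (le_of_eq hcube) (hcube ▸ cube_lt_cube (by omega)) n.toNat n rfl hLle
      simp only [hnewt]
      rw [if_pos (by linear_combination hcube)]
    · have hL2 : 2 ≤ L := by
        rcases lt_or_eq_of_le hL1 with h | h
        · omega
        · exfalso; rw [← h] at hLn hcube; norm_num at hLn hcube; omega
      have hs : (L - 1) ^ 3 < n := hLless (L - 1) (by omega)
      have hr3 : (L - 1) ^ 3 ≤ n := le_of_lt hs
      have hnlt : n < (L - 1 + 1) ^ 3 := by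
        have : n < L ^ 3 := lt_of_le_of_ne hLn (Ne.symm hcube)
        simpa using this
      have hnewt : newtLoop n n = L - 1 :=
        newtLoop_eq (by omega) hr3 hnlt n.toNat n rfl (by omega)
      simp only [hnewt]
      have hne : (L - 1) * (L - 1) * (L - 1) ≠ n := by nlinarith [hs]
      rw [if_neg hne, sub_add_cancel]
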